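-- pv_equiv track=rewrite | github.com/aNGaN1os/ergasies_python | project 4.py | First2Words
-- ===== SOURCE A (Python) =====
-- def First2Words(x):
--     i=0
--     wordNum=1
--     while (wordNum!=3):
--         if (x[i]==" " and wordNum==1):
--             wordNum=2
--         elif (x[i]==" " and wordNum==2):
--             wordNum=3
--         i+=1
--     return x[:i-1]
-- ===== SOURCE B (Python) =====
-- def First2Words(x):
--     spaces = [j for j, c in enumerate(x) if c == " "]
--     return x[:spaces[1]]
-- ===== Notes on version B (the rewrite author's own statement) =====
-- stated objective: simpler
-- what changed: Replaces A's space-counting while-loop state machine (i/wordNum) with a precomputed list of all space positions and a single index spaces[1] giving the prefix before the second space.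
import Mathlib
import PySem

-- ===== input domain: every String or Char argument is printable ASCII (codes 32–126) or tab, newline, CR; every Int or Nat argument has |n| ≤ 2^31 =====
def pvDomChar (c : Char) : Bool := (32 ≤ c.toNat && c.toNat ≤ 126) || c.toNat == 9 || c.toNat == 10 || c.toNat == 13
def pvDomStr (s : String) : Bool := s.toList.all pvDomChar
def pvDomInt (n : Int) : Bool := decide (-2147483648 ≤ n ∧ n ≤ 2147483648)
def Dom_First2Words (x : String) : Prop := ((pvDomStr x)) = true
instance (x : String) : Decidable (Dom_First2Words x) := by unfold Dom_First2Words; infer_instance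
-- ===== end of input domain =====

-- B replaces A's space-counting while-loop state machine with a list of all space
-- positions indexed at [1] (objective: simpler).

-- ===== PORT A =====
-- the while loop: scan chars, i = current index, w = wordNum; none = IndexError (x[i] off the end)
def First2Words.go : List Char → Int → Int → Option Int
  | [], _, _ => none
  | c :: cs, i, w =>
    let w' := if c == ' ' && w == 1 then 2
              else if c == ' ' && w == 2 then 3
              else w
    if w' == 3 then some (i + 1) else First2Words.go cs (i + 1) w'

def First2Words (x : String) : String :=
  match First2Words.go x.toList 0 1 with
  | some i => String.mk (PySem.List.slice x.toList none (some (i - 1)))   -- x[:i-1]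
  | none => ""   -- Python raises IndexError here; excluded by Pre_

-- ===== PORT B =====
def First2Words_alt (x : String) : String :=
  let spaces := ((PySem.List.enumerate x.toList 0).filter (fun p => p.2 == ' ')).map (fun p => p.1)
  match PySem.List.pyGet? spaces 1 with
  | some p => String.mk (PySem.List.slice x.toList none (some p))   -- x[:spaces[1]]
  | none => ""   -- Python raises IndexError here; excluded by Pre_

-- ===== PRECONDITION & SPEC =====
-- Pre_ excludes exactly the inputs with fewer than two spaces, where Python A (and B) raise IndexError.
def Pre_First2Words (x : String) : Prop := 2 ≤ x.toList.count ' '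
instance (x : String) : Decidable (Pre_First2Words x) := by unfold Pre_First2Words; infer_instance
def pvWitness_First2Words : String := "ab cd ef"

def Spec_First2Words (x : String) (out : String) : Prop := out = First2Words_alt x
instance (x : String) (out : String) : Decidable (Spec_First2Words x out) := by unfold Spec_First2Words; infer_instance

-- ===== CLAIM (what is proved, stated in full; the proofs are below) =====
def Claim_equal_First2Words : Prop := ∀ (x : String), Dom_First2Words x → Pre_First2Words x → Spec_First2Words x (First2Words x)

-- ===== LEMMAS AND PROOFS =====

-- space positions of cs, numbering from j
def spacesAux : List Char → Int → List Int
  | [], _ => []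
  | c :: cs, j => if c == ' ' then j :: spacesAux cs (j + 1) else spacesAux cs (j + 1)

theorem enumerate_filter_spaces (cs : List Char) (j : Int) :
    ((PySem.List.enumerate cs j).filter (fun p => p.2 == ' ')).map (fun p => p.1) = spacesAux cs j := by
  induction cs generalizing j with
  | nil => simp [PySem.List.enumerate_nil, spacesAux]
  | cons c cs ih =>
    simp only [PySem.List.enumerate_cons, List.filter_cons, spacesAux]
    by_cases h : c = ' '
    · simp [h, ih]
    · simp [h, ih]

theorem go_two (cs : List Char) (i : Int) :
    First2Words.go cs i 2 = (spacesAux cs i)[0]?.map (· + 1) := by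
  induction cs generalizing i with
  | nil => simp [First2Words.go, spacesAux]
  | cons c cs ih =>
    by_cases h : c = ' '
    · simp [First2Words.go, spacesAux, h]
    · simp [First2Words.go, spacesAux, h, ih]

theorem go_one (cs : List Char) (i : Int) :
    First2Words.go cs i 1 = (spacesAux cs i)[1]?.map (· + 1) := by
  induction cs generalizing i with
  | nil => simp [First2Words.go, spacesAux]
  | cons c cs ih =>
    by_cases h : c = ' '
    · simp [First2Words.go, spacesAux, h, go_two]
    · simp [First2Words.go, spacesAux, h, ih]

-- ===== VERDICT (by name: the statement is the Claim_ definition above) =====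
theorem First2Words_spec : Claim_equal_First2Words := by
  intro x _ _
  unfold Spec_First2Words First2Words First2Words_alt
  rw [go_one]
  have hget : PySem.List.pyGet?
      (((PySem.List.enumerate x.toList 0).filter (fun p => p.2 == ' ')).map (fun p => p.1)) 1
      = (spacesAux x.toList 0)[1]? := by
    rw [enumerate_filter_spaces]
    rw [show (1:Int) = ((1:Nat):Int) by norm_num, PySem.List.pyGet?_natCast]
  simp only [hget]
  cases h : (spacesAux x.toList 0)[1]? with
  | none => simp
  | some p => simp
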